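-- pv_equiv track=rewrite | github.com/kcharris/AdventOfCode2024 | Day24/answer2.py | isValidXYZ
-- ===== SOURCE A (Python) =====
-- def wireNumAndMSB(d, l):
--     bit_arr = []
--     for i in range(99, -1,-1):
--         key = "{}{:02d}".format(l, i)
--         if key in d:
--             bit_arr.append(d[key])
--     return int("".join(map(str, bit_arr)),2), len(bit_arr)
--
-- def isValidXYZ(d):
--     for k in d:
--         if d[k] == None:
--             return False
--     x, x_msb = wireNumAndMSB(d, "x")
--     y, y_msb = wireNumAndMSB(d, "y")
--     z, z_msb = wireNumAndMSB(d, "z")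
--     if (x + y) % 2**(z_msb) == z:
--         return True
--     return False
-- ===== SOURCE B (Python) =====
-- def isValidXYZ(d):
--     # One pass over the dict's actual items (no 100-probe loops): group the
--     # x/y/z wire entries by parsed index, fail fast on a None value, then sort
--     # each group by index descending and read the numbers off once.
--     xs, ys, zs = [], [], []
--     for k, v in d.items():
--         if v is None:
--             return False
--         if len(k) == 3 and k[1].isdigit() and k[2].isdigit():
--             idx = 10 * (ord(k[1]) - 48) + (ord(k[2]) - 48)
--             if k[0] == 'x':
--                 xs.append((idx, v))
--             elif k[0] == 'y':
--                 ys.append((idx, v))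
--             elif k[0] == 'z':
--                 zs.append((idx, v))
--
--     def num_msb(pairs):
--         bits = sorted(pairs, key=lambda p: p[0], reverse=True)
--         return int("".join(str(v) for _, v in bits), 2), len(pairs)
--
--     x, _ = num_msb(xs)
--     y, _ = num_msb(ys)
--     z, z_msb = num_msb(zs)
--     return (x + y) % 2 ** z_msb == z
-- ===== Notes on version B (the rewrite author's own statement) =====
-- stated objective: alternative
-- what changed: Instead of probing 300 formatted keys l+'00'..l+'99' against the dict per call and building strings with a helper, B makes one pass over the dict's actual items, failing fast on a None value and grouping x/y/z wire entries by their parsed two-digit index, then sorts each group descending and reads the same binary string off it; …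
import Mathlib
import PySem

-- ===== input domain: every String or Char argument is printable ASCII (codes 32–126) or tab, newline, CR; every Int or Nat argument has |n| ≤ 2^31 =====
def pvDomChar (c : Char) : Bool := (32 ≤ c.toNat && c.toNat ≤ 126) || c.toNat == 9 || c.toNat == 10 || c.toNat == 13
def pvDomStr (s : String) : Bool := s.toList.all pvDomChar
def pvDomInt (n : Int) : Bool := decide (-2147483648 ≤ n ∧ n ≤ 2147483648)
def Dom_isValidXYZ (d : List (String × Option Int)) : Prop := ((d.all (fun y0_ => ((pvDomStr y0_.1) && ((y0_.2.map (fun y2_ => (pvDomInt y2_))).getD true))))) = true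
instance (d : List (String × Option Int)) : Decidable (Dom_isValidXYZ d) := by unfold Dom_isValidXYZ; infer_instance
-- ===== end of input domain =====

-- B replaces A's 300 formatted-key probe loops by one pass over the dict's actual
-- items (grouping x/y/z wires by parsed index, failing fast on None) followed by one
-- descending sort per group; objective: alternative decomposition, no speed claim.

-- ===== PORT A =====
-- "{:02d}".format(i): two decimal digit characters; exact for 0 ≤ i ≤ 99 (the only
-- arguments A passes).
def pvFmt2 (i : Int) : List Char :=
  [Char.ofNat (48 + i.toNat / 10), Char.ofNat (48 + i.toNat % 10)]

-- "{}{:02d}".format(l, i)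
def pvKeyA (l : Char) (i : Int) : String := String.ofList (l :: pvFmt2 i)

-- d[k] for a dict rendered as an association list: first matching entry.
def pvGetA (d : List (String × Option Int)) (k : String) : Option (Option Int) :=
  (d.find? (fun p => p.1 == k)).map (fun p => p.2)

-- str(v) for the values A joins (str(None) = "None")
def pvStrOf (v : Option Int) : List Char :=
  match v with
  | some n => PySem.Int.toChars n
  | none => ['N', 'o', 'n', 'e']

-- the bit_arr loop of wireNumAndMSB
def pvBitsA (d : List (String × Option Int)) (l : Char) : List (Option Int) :=
  (PySem.List.pyRange 99 (-1) (-1)).foldl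
    (fun acc i =>
      if d.any (fun p => p.1 == pvKeyA l i) then acc ++ [(pvGetA d (pvKeyA l i)).getD none]
      else acc) []

-- wireNumAndMSB; int("".join(...), 2) raises ValueError where ofCharsBase? is none —
-- those inputs are excluded by Pre_, the (0, len) branch is never reached inside it.
def pvWireNumMsb (d : List (String × Option Int)) (l : Char) : Int × Int :=
  let bits := pvBitsA d l
  match PySem.Int.ofCharsBase? ((bits.map pvStrOf).flatten) 2 with
  | some n => (n, PySem.List.len bits)
  | none => (0, PySem.List.len bits)

def isValidXYZ (d : List (String × Option Int)) : Bool :=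
  if d.any (fun p => pvGetA d p.1 == some none) then false
  else
    let x := pvWireNumMsb d 'x'
    let y := pvWireNumMsb d 'y'
    let z := pvWireNumMsb d 'z'
    if PySem.Int.mod (x.1 + y.1) ((2 : Int) ^ (z.2).toNat) == z.1 then true else false

-- ===== PORT B =====
-- 10 * (ord(k[1]) - 48) + (ord(k[2]) - 48)
def pvIdx (c1 c2 : Char) : Int := 10 * ((c1.toNat : Int) - 48) + ((c2.toNat : Int) - 48)

-- B's single for-loop: grouping accumulators xs/ys/zs, 'return False' on a None value.
def pvCollect (rest : List (String × Option Int)) (xs ys zs : List (Int × Int)) :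
    Option (List (Int × Int) × List (Int × Int) × List (Int × Int)) :=
  match rest with
  | [] => some (xs, ys, zs)
  | (k, v) :: r =>
    match v with
    | none => none
    | some b =>
      match k.toList with       -- len(k) == 3 together with k[0], k[1], k[2]
      | [c0, c1, c2] =>
        if PySem.Str.isdigit c1 && PySem.Str.isdigit c2 then
          if c0 == 'x' then pvCollect r (xs ++ [(pvIdx c1 c2, b)]) ys zs
          else if c0 == 'y' then pvCollect r xs (ys ++ [(pvIdx c1 c2, b)]) zs
          else if c0 == 'z' then pvCollect r xs ys (zs ++ [(pvIdx c1 c2, b)])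
          else pvCollect r xs ys zs
        else pvCollect r xs ys zs
      | _ => pvCollect r xs ys zs

-- num_msb: sort descending by index, join the bit reprs, parse base 2; the ValueError
-- of int("", 2) (none branch) lies outside Pre_.
def pvNumMsb (pairs : List (Int × Int)) : Int × Int :=
  let bits := PySem.List.sorted pairs (fun p => p.1) true
  match PySem.Int.ofCharsBase? ((bits.map (fun p => PySem.Int.toChars p.2)).flatten) 2 with
  | some n => (n, PySem.List.len pairs)
  | none => (0, PySem.List.len pairs)

def isValidXYZ_alt (d : List (String × Option Int)) : Bool :=
  match pvCollect d [] [] [] with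
  | none => false
  | some (xs, ys, zs) =>
    let x := pvNumMsb xs
    let y := pvNumMsb ys
    let z := pvNumMsb zs
    PySem.Int.mod (x.1 + y.1) ((2 : Int) ^ (z.2).toNat) == z.1

-- ===== PRECONDITION & SPEC =====
-- k is an x/y/z wire key of the shape A probes: letter plus exactly two ASCII digits.
def pvWireB (l : Char) (k : String) : Bool :=
  match k.toList with
  | [c0, c1, c2] =>
    (decide ('0' ≤ c1) && decide (c1 ≤ '9')) && (decide ('0' ≤ c2) && decide (c2 ≤ '9')) && c0 == l
  | _ => false

-- v is a nonnegative value whose decimal repr is a string of '0'/'1' digits.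
def pvBitB (v : Option Int) : Bool :=
  match v with
  | none => false
  | some n => (PySem.Int.toChars n).all (fun c => c == '0' || c == '1')

-- v is a negative value -n whose repr is '-' followed by '0'/'1' digits (valid only
-- as the leading, i.e. highest-indexed, wire value of a group).
def pvNegBitB (v : Option Int) : Bool :=
  match v with
  | none => false
  | some n => decide (n < 0) && (PySem.Int.toChars (-n)).all (fun c => c == '0' || c == '1')

-- the parsed index of a wire key
def pvIdxOf (k : String) : Int :=
  match k.toList with
  | [_, c1, c2] => pvIdx c1 c2
  | _ => 0

-- the x/y/z wire group of prefix l is nonempty and its joined value string is a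
-- valid base-2 literal: every value's decimal repr is '0'/'1' digits, with at most
-- the highest-indexed wire of the group allowed a negative such value (its '-' sign
-- then leads the joined string).
def pvGroupOkB (d : List (String × Option Int)) (l : Char) : Bool :=
  d.any (fun p => pvWireB l p.1) &&
  d.all (fun p => !(pvWireB l p.1) || pvBitB p.2 ||
    (pvNegBitB p.2 && d.all (fun q => !(pvWireB l q.1) || decide (pvIdxOf q.1 ≤ pvIdxOf p.1))))

-- Pre_ excludes (a) association lists with duplicate keys — a Python dict cannot carry
-- them, so first-match order there is an artefact of the List rendering — and
-- (b) EXACTLY the inputs on which A raises ValueError from int(s, 2): no None value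
-- present, and some x/y/z wire group is empty or its joined value string is not a
-- valid base-2 literal; everywhere A returns, Pre_ admits the input.
def Pre_isValidXYZ (d : List (String × Option Int)) : Prop :=
  (d.map Prod.fst).Nodup ∧
  (d.any (fun p => p.2 == none) ||
   (pvGroupOkB d 'x' && pvGroupOkB d 'y' && pvGroupOkB d 'z')) = true
instance (d : List (String × Option Int)) : Decidable (Pre_isValidXYZ d) := by
  unfold Pre_isValidXYZ; infer_instance

def pvWitness_isValidXYZ : (List (String × Option Int)) :=
  [("x00", some 1), ("y00", some 0), ("z00", some 1)]

def Spec_isValidXYZ (d : List (String × Option Int)) (out : Bool) : Prop := out = isValidXYZ_alt d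
instance (d : List (String × Option Int)) (out : Bool) : Decidable (Spec_isValidXYZ d out) := by
  unfold Spec_isValidXYZ; infer_instance

-- ===== CLAIM (what is proved, stated in full; the proofs are below) =====
def Claim_equal_isValidXYZ : Prop :=
  ∀ (d : List (String × Option Int)), Dom_isValidXYZ d → Pre_isValidXYZ d →
    Spec_isValidXYZ d (isValidXYZ d)

-- ===== LEMMAS AND PROOFS =====


-- proof-side helper definitions
def pvPres (d : List (String × Option Int)) (l : Char) (i : Int) : Bool :=
  d.any (fun p => p.1 == pvKeyA l i)

def pvVal (d : List (String × Option Int)) (k : String) : Int :=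
  ((pvGetA d k).getD none).getD 0

def pvT (d : List (String × Option Int)) (l : Char) : List (Int × Int) :=
  ((PySem.List.pyRange 99 (-1) (-1)).filter (pvPres d l)).map (fun i => (i, pvVal d (pvKeyA l i)))

def pvF (d : List (String × Option Int)) (l : Char) : List (Int × Int) :=
  (d.filter (fun p => pvWireB l p.1)).map (fun p => (pvIdxOf p.1, p.2.getD 0))

-- dict lookup of a present key under nodup keys returns that entry
theorem pvFindSelf {d : List (String × Option Int)} (hnd : (d.map Prod.fst).Nodup)
    {p : String × Option Int} (hp : p ∈ d) :
    d.find? (fun q => q.1 == p.1) = some p := by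
  induction d with
  | nil => cases hp
  | cons q r ih =>
    simp only [List.map_cons, List.nodup_cons] at hnd
    rcases List.mem_cons.mp hp with h | h
    · subst h; simp
    · have hne : q.1 ≠ p.1 := by
        intro he
        exact hnd.1 (he ▸ List.mem_map_of_mem h)
      simp [hne, ih hnd.2 h]

theorem pvDigitToNat {c : Char} (h1 : '0' ≤ c) (h2 : c ≤ '9') :
    48 ≤ c.toNat ∧ c.toNat ≤ 57 := by
  simp only [Char.le_def, UInt32.le_iff_toNat_le] at h1 h2
  exact ⟨h1, h2⟩

theorem pvFmtSpec : ∀ n : Nat, n < 100 →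
    ('0' ≤ Char.ofNat (48 + n / 10) ∧ Char.ofNat (48 + n / 10) ≤ '9') ∧
    ('0' ≤ Char.ofNat (48 + n % 10) ∧ Char.ofNat (48 + n % 10) ≤ '9') ∧
    pvIdx (Char.ofNat (48 + n / 10)) (Char.ofNat (48 + n % 10)) = (n : Int) := by
  decide

theorem pvKeyA_toList (l : Char) (i : Int) :
    (pvKeyA l i).toList = [l, Char.ofNat (48 + i.toNat / 10), Char.ofNat (48 + i.toNat % 10)] := by
  simp [pvKeyA, pvFmt2]

-- the key A probes at index i is a wire key whose parsed index is i
theorem pvWire_of_key (l : Char) (i : Int) (h0 : 0 ≤ i) (h9 : i ≤ 99) :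
    pvWireB l (pvKeyA l i) = true ∧ pvIdxOf (pvKeyA l i) = i := by
  have hn : i.toNat < 100 := by omega
  obtain ⟨h1, h2, h3⟩ := pvFmtSpec i.toNat hn
  constructor
  · simp [pvWireB, pvKeyA_toList, h1.1, h1.2, h2.1, h2.2]
  · simp only [pvIdxOf, pvKeyA_toList]
    rw [h3]; omega

-- conversely each wire key is A's key at its parsed index
theorem pvKey_of_wire {l : Char} {k : String} (h : pvWireB l k = true) :
    pvKeyA l (pvIdxOf k) = k ∧ 0 ≤ pvIdxOf k ∧ pvIdxOf k ≤ 99 := by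
  unfold pvWireB at h
  split at h
  case h_2 => exact absurd h (by simp)
  case h_1 cs c0 c1 c2 heq =>
    simp only [Bool.and_eq_true, decide_eq_true_eq, beq_iff_eq] at h
    obtain ⟨⟨⟨ha1, ha2⟩, hb1, hb2⟩, hc⟩ := h
    obtain ⟨ha1', ha2'⟩ := pvDigitToNat ha1 ha2
    obtain ⟨hb1', hb2'⟩ := pvDigitToNat hb1 hb2
    have hidx : pvIdxOf k = pvIdx c1 c2 := by simp [pvIdxOf, heq]
    have hv : (pvIdx c1 c2).toNat = 10 * (c1.toNat - 48) + (c2.toNat - 48) := by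
      simp only [pvIdx]; omega
    have hd : (pvIdx c1 c2).toNat / 10 = c1.toNat - 48 := by omega
    have hm : (pvIdx c1 c2).toNat % 10 = c2.toNat - 48 := by omega
    refine ⟨?_, ?_, ?_⟩
    · have hlist : (pvKeyA l (pvIdxOf k)).toList = k.toList := by
        rw [pvKeyA_toList, heq, hidx, hd, hm]
        have e1 : 48 + (c1.toNat - 48) = c1.toNat := by omega
        have e2 : 48 + (c2.toNat - 48) = c2.toNat := by omega
        rw [e1, e2, Char.ofNat_toNat, Char.ofNat_toNat, hc]
      calc pvKeyA l (pvIdxOf k) = String.ofList ((pvKeyA l (pvIdxOf k)).toList) := by simp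
        _ = String.ofList k.toList := by rw [hlist]
        _ = k := by simp
    · rw [hidx]; simp only [pvIdx]; omega
    · rw [hidx]; simp only [pvIdx]; omega

theorem pvCollect_none {d : List (String × Option Int)} (h : ∃ p ∈ d, p.2 = none)
    (xs ys zs : List (Int × Int)) : pvCollect d xs ys zs = none := by
  induction d generalizing xs ys zs with
  | nil => simp at h
  | cons q r ih =>
    obtain ⟨k, v⟩ := q
    rcases h with ⟨p, hp, hv⟩
    rcases List.mem_cons.mp hp with rfl | hmem
    · simp at hv; subst hv; simp [pvCollect]
    · cases v with
      | none => simp [pvCollect]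
      | some b =>
        have h' : ∃ p ∈ r, p.2 = none := ⟨p, hmem, hv⟩
        simp only [pvCollect]
        split
        all_goals try split_ifs
        all_goals exact ih h' ..

theorem pvCollect_some {d : List (String × Option Int)} (h : ∀ p ∈ d, p.2 ≠ none)
    (xs ys zs : List (Int × Int)) :
    pvCollect d xs ys zs = some (xs ++ pvF d 'x', ys ++ pvF d 'y', zs ++ pvF d 'z') := by
  induction d generalizing xs ys zs with
  | nil => simp [pvCollect, pvF]
  | cons q r ih =>
    obtain ⟨k, v⟩ := q
    have hq : v ≠ none := h (k, v) (List.mem_cons_self)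
    have hr : ∀ p ∈ r, p.2 ≠ none := fun p hp => h p (List.mem_cons_of_mem _ hp)
    cases v with
    | none => exact absurd rfl hq
    | some b =>
      have hfil : ∀ l : Char, pvF ((k, some b) :: r) l =
          (if pvWireB l k then [(pvIdxOf k, b)] else []) ++ pvF r l := by
        intro l
        simp only [pvF, List.filter_cons]
        split <;> simp
      rcases hk : k.toList with _ | ⟨c0, _ | ⟨c1, _ | ⟨c2, _ | cs⟩⟩⟩
      case cons.cons.cons.nil =>
        -- the wire-shaped key [c0, c1, c2]
        by_cases hdig : (PySem.Str.isdigit c1 && PySem.Str.isdigit c2) = true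
        · have hw : ∀ l : Char, pvWireB l k = (c0 == l) := by
            intro l
            simp only [pvWireB, hk]
            simp only [PySem.Str.isdigit, PySem.Chars.isdigit, Bool.and_eq_true] at hdig
            simp [hdig.1, hdig.2]
          have hio : pvIdxOf k = pvIdx c1 c2 := by simp [pvIdxOf, hk]
          simp only [pvCollect, hk, if_pos hdig]
          by_cases hx : c0 = 'x'
          · subst hx
            simp only [hfil, hw, hio]
            rw [if_pos (by simp), ih hr]
            simp
          · by_cases hy : c0 = 'y'
            · subst hy
              rw [if_neg (by simp), if_pos (by simp), ih hr]
              simp only [hfil, hw, hio]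
              simp
            · by_cases hz : c0 = 'z'
              · subst hz
                rw [if_neg (by simp), if_neg (by simp), if_pos (by simp), ih hr]
                simp only [hfil, hw, hio]
                simp
              · rw [if_neg (by simp [hx]), if_neg (by simp [hy]), if_neg (by simp [hz]),
                  ih hr]
                simp only [hfil, hw, hio]
                simp [hx, hy, hz]
        · have hAB : ((decide ('0' ≤ c1) && decide (c1 ≤ '9')) &&
              (decide ('0' ≤ c2) && decide (c2 ≤ '9'))) = false := by
            rw [Bool.eq_false_iff]
            intro hc
            exact hdig (by simpa [PySem.Str.isdigit, PySem.Chars.isdigit] using hc)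
          have hw : ∀ l : Char, pvWireB l k = false := by
            intro l
            simp only [pvWireB, hk, hAB, Bool.false_and]
          simp only [pvCollect, hk, if_neg hdig]
          rw [ih hr]
          simp only [hfil, hw]
          simp
      all_goals (
        have hw : ∀ l : Char, pvWireB l k = false := by intro l; simp [pvWireB, hk]
        simp only [pvCollect, hk]
        rw [ih hr]
        simp only [hfil, hw]
        simp)

theorem pvT_pairwise (d : List (String × Option Int)) (l : Char) :
    (pvT d l).Pairwise (fun a b => b.1 < a.1) := by
  unfold pvT
  rw [List.pairwise_map]
  apply List.Pairwise.filter
  rw [PySem.List.pyRange_neg_one_eq_reverse, List.pairwise_reverse]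
  simpa using PySem.List.pairwise_lt_pyRange_one (-1 + 1) (99 + 1)

theorem pvT_mem {d : List (String × Option Int)} (hnd : (d.map Prod.fst).Nodup)
    (_hall : ∀ p ∈ d, p.2 ≠ none) (l : Char) (q : Int × Int) :
    q ∈ pvT d l ↔ q ∈ pvF d l := by
  constructor
  · intro hq
    simp only [pvT, List.mem_map, List.mem_filter] at hq
    obtain ⟨i, ⟨hir, hpres⟩, rfl⟩ := hq
    have hi := (PySem.List.mem_pyRange_neg_one).mp hir
    simp only [pvPres, List.any_eq_true] at hpres
    obtain ⟨p, hp, hbeq⟩ := hpres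
    have hkey : p.1 = pvKeyA l i := by simpa using hbeq
    have hfind := pvFindSelf hnd hp
    have hval : pvVal d (pvKeyA l i) = p.2.getD 0 := by
      simp [pvVal, pvGetA, ← hkey, hfind]
    obtain ⟨hwire, hidx⟩ := pvWire_of_key l i (by omega) (by omega)
    simp only [pvF, List.mem_map, List.mem_filter]
    refine ⟨p, ⟨hp, by rw [hkey, hwire]⟩, ?_⟩
    rw [hkey, hidx, hval]
  · intro hq
    simp only [pvF, List.mem_map, List.mem_filter] at hq
    obtain ⟨p, ⟨hp, hw⟩, rfl⟩ := hq
    obtain ⟨hkeq, h0, h9⟩ := pvKey_of_wire hw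
    have hval : pvVal d (pvKeyA l (pvIdxOf p.1)) = p.2.getD 0 := by
      rw [hkeq]; simp [pvVal, pvGetA, pvFindSelf hnd hp]
    simp only [pvT, List.mem_map, List.mem_filter]
    refine ⟨pvIdxOf p.1, ⟨?_, ?_⟩, ?_⟩
    · exact (PySem.List.mem_pyRange_neg_one).mpr ⟨by omega, h9⟩
    · simp only [pvPres, List.any_eq_true]
      exact ⟨p, hp, by rw [hkeq]; simp⟩
    · rw [hval]

theorem pvF_nodup {d : List (String × Option Int)} (hnd : (d.map Prod.fst).Nodup) (l : Char) :
    (pvF d l).Nodup := by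
  have hsub : ((d.filter (fun p => pvWireB l p.1)).map Prod.fst).Sublist (d.map Prod.fst) :=
    List.Sublist.map Prod.fst List.filter_sublist
  have hkeys : ((d.filter (fun p => pvWireB l p.1)).map Prod.fst).Nodup := hnd.sublist hsub
  have hfn : (d.filter (fun p => pvWireB l p.1)).Nodup := hkeys.of_map _
  apply List.Nodup.map_on _ hfn
  intro p hp q hq heq
  have hwp : pvWireB l p.1 = true := (List.mem_filter.mp hp).2
  have hwq : pvWireB l q.1 = true := (List.mem_filter.mp hq).2
  have hpd : p ∈ d := (List.mem_filter.mp hp).1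
  have hqd : q ∈ d := (List.mem_filter.mp hq).1
  have hkeq : p.1 = q.1 := by
    have h1 := (pvKey_of_wire hwp).1
    have h2 := (pvKey_of_wire hwq).1
    have : pvIdxOf p.1 = pvIdxOf q.1 := congrArg Prod.fst heq
    rw [← h1, ← h2, this]
  have hfq := pvFindSelf hnd hpd
  rw [hkeq, pvFindSelf hnd hqd] at hfq
  exact (Option.some_inj.mp hfq).symm

theorem pvSorted_F {d : List (String × Option Int)} (hnd : (d.map Prod.fst).Nodup)
    (hall : ∀ p ∈ d, p.2 ≠ none) (l : Char) :
    PySem.List.sorted (pvF d l) (fun p => p.1) true = pvT d l :=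
  PySem.List.sorted_rev_eq_of_perm_of_pairwise_gt _ _ _
    ((List.perm_ext_iff_of_nodup
        ((pvT_pairwise d l).imp (fun {a b} h => by
          intro he; subst he; exact lt_irrefl _ h))
        (pvF_nodup hnd l)).mpr (pvT_mem hnd hall l))
    (pvT_pairwise d l)

theorem pvBitsA_eq_T {d : List (String × Option Int)} (hnd : (d.map Prod.fst).Nodup)
    (hall : ∀ p ∈ d, p.2 ≠ none) (l : Char) :
    pvBitsA d l = (pvT d l).map (fun q => some q.2) := by
  unfold pvBitsA pvT
  rw [PySem.List.foldl_append_if (fun i => d.any (fun p => p.1 == pvKeyA l i))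
    (fun i => (pvGetA d (pvKeyA l i)).getD none), List.map_map, List.nil_append]
  apply List.map_congr_left
  intro i hi
  have hpres : pvPres d l i = true := (List.mem_filter.mp hi).2
  simp only [pvPres, List.any_eq_true] at hpres
  obtain ⟨p, hp, hbeq⟩ := hpres
  have hkey : p.1 = pvKeyA l i := by simpa using hbeq
  have hfind := pvFindSelf hnd hp
  obtain ⟨b, hb⟩ := Option.ne_none_iff_exists'.mp (hall p hp)
  simp only [Function.comp]
  simp [pvGetA, pvVal, ← hkey, hfind, hb]

theorem pvNumMsb_eq {d : List (String × Option Int)} (hnd : (d.map Prod.fst).Nodup)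
    (hall : ∀ p ∈ d, p.2 ≠ none) (l : Char) :
    pvNumMsb (pvF d l) = pvWireNumMsb d l := by
  have hperm : (pvT d l).Perm (pvF d l) :=
    (List.perm_ext_iff_of_nodup
        ((pvT_pairwise d l).imp (fun {a b} h => by
          intro he; subst he; exact lt_irrefl _ h))
        (pvF_nodup hnd l)).mpr (pvT_mem hnd hall l)
  have hjoin : (pvT d l).map (pvStrOf ∘ fun q => some q.2) =
      (pvT d l).map (fun p => PySem.Int.toChars p.2) := by
    apply List.map_congr_left
    intro q _
    simp [pvStrOf, Function.comp]
  have hlen : PySem.List.len (pvF d l) =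
      PySem.List.len ((pvT d l).map (fun q => some (q.2 : Int))) := by
    simp only [PySem.List.len_eq, List.length_map]
    exact_mod_cast hperm.length_eq.symm
  simp only [pvNumMsb, pvWireNumMsb, pvSorted_F hnd hall l, pvBitsA_eq_T hnd hall l,
    hlen, List.map_map]
  rw [hjoin]

theorem pvCheck_true {d : List (String × Option Int)} (hnd : (d.map Prod.fst).Nodup)
    (h : ∃ p ∈ d, p.2 = none) :
    (d.any (fun p => pvGetA d p.1 == some none)) = true := by
  obtain ⟨p, hp, hv⟩ := h
  rw [List.any_eq_true]
  exact ⟨p, hp, by simp [pvGetA, pvFindSelf hnd hp, hv]⟩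

theorem pvCheck_false {d : List (String × Option Int)} (hnd : (d.map Prod.fst).Nodup)
    (hall : ∀ p ∈ d, p.2 ≠ none) :
    (d.any (fun p => pvGetA d p.1 == some none)) = false := by
  rw [List.any_eq_false]
  intro p hp
  simp [pvGetA, pvFindSelf hnd hp]
  exact hall p hp


-- ===== VERDICT =====
theorem isValidXYZ_spec : Claim_equal_isValidXYZ := by
  intro d hDom hPre
  obtain ⟨hnd, hcase⟩ := hPre
  unfold Spec_isValidXYZ
  by_cases hN : ∃ p ∈ d, p.2 = none
  · simp only [isValidXYZ, isValidXYZ_alt, pvCheck_true hnd hN, pvCollect_none hN, if_true]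
  · push_neg at hN
    simp only [isValidXYZ, isValidXYZ_alt, pvCheck_false hnd hN, pvCollect_some hN,
      List.nil_append, Bool.false_eq_true, if_false, pvNumMsb_eq hnd hN]
    cases hb : (PySem.Int.mod ((pvWireNumMsb d 'x').1 + (pvWireNumMsb d 'y').1)
        ((2 : Int) ^ ((pvWireNumMsb d 'z').2).toNat) == (pvWireNumMsb d 'z').1) <;>
      simp [hb]
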